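-- pv_equiv track=rewrite | github.com/BITprogramMan/coding_practice | 左神中级班/最小使用袋子数.py | process
-- ===== SOURCE A (Python) =====
-- def process(n):
--     if n & 1 == 1:
--         return -1
--     if n % 8 == 0:
--         return n // 8
--     num_bags_8 = n // 8
--     rest = n % 8
--     while num_bags_8 >= 0 and rest < 24:
--         if rest % 6 == 0:
--             return num_bags_8 + rest // 6
--         else:
--             num_bags_8 -= 1
--             rest += 8
--     return -1
-- ===== SOURCE B (Python) =====
-- def process(n):
--     if n % 2:
--         return -1
--     if n % 8 == 0:
--         return n // 8
--     if n < 0 or n in (2, 4, 10):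
--         return -1
--     return -(-n // 8)
-- ===== Notes on version B (the rewrite author's own statement) =====
-- stated objective: simpler
-- what changed: Replaced A's bag-counting while loop over (num_bags_8, rest) states with a closed-form: -1 for odd/negative/{2,4,10} inputs, n//8 for multiples of 8, and ceil(n/8) = -(-n//8) for every other feasible even n.
import Mathlib
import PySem

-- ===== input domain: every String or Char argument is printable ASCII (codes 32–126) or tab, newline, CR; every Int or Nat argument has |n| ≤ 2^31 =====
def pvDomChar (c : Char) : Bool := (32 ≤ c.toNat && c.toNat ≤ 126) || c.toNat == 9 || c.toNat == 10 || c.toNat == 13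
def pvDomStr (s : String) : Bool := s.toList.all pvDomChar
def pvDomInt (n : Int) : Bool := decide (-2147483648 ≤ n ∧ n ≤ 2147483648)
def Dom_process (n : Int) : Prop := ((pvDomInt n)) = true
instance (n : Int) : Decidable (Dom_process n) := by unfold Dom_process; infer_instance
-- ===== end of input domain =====

-- B replaces A's while loop with a closed-form case split (odd/negative/{2,4,10} -> -1,
-- multiples of 8 -> n//8, otherwise ceil(n/8)); objective: simpler, same cost.

-- ===== PORT A =====
-- A's while loop: state (num_bags_8, rest); condition num_bags_8 >= 0 and rest < 24.
-- rest grows by 8 each iteration, so (24 - rest).toNat decreases.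
def processLoop (bags rest : Int) : Int :=
  if bags ≥ 0 ∧ rest < 24 then
    if PySem.Int.mod rest 6 = 0 then bags + PySem.Int.floordiv rest 6
    else processLoop (bags - 1) (rest + 8)
  else -1
termination_by (24 - rest).toNat
decreasing_by omega

-- 'n & 1' on Python ints is bitwise AND; ported exactly via PySem.Int.band.
def process (n : Int) : Int :=
  if PySem.Int.band n 1 = 1 then -1
  else if PySem.Int.mod n 8 = 0 then PySem.Int.floordiv n 8
  else processLoop (PySem.Int.floordiv n 8) (PySem.Int.mod n 8)

-- ===== PORT B =====
-- 'if n % 2:' tests Python truthiness of n % 2, i.e. n % 2 != 0.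
def process_alt (n : Int) : Int :=
  if PySem.Int.mod n 2 ≠ 0 then -1
  else if PySem.Int.mod n 8 = 0 then PySem.Int.floordiv n 8
  else if n < 0 ∨ n = 2 ∨ n = 4 ∨ n = 10 then -1
  else -(PySem.Int.floordiv (-n) 8)

-- ===== PRECONDITION & SPEC =====
def Spec_process (n : Int) (out : Int) : Prop := out = process_alt n
instance (n : Int) (out : Int) : Decidable (Spec_process n out) := by unfold Spec_process; infer_instance

-- ===== CLAIM (what is proved, stated in full; the proofs are below) =====
def Claim_equal_process : Prop := ∀ (n : Int), Dom_process n → Spec_process n (process n)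

-- ===== LEMMAS AND PROOFS =====
-- Closed forms for A's loop at each reachable start value of rest (n % 8 ∈ {2, 4, 6}).
lemma processLoop_six (b : Int) : processLoop b 6 = if b ≥ 0 then b + 1 else -1 := by
  rw [processLoop]
  split_ifs <;> simp_all [PySem.Int.mod, PySem.Int.floordiv]

lemma processLoop_four (b : Int) : processLoop b 4 = if b ≥ 1 then b + 1 else -1 := by
  rw [processLoop, processLoop]
  split_ifs <;> simp_all [PySem.Int.mod, PySem.Int.floordiv] <;> omega

lemma processLoop_two (b : Int) : processLoop b 2 = if b ≥ 2 then b + 1 else -1 := by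
  rw [processLoop, processLoop, processLoop]
  split_ifs <;> simp_all [PySem.Int.mod, PySem.Int.floordiv] <;> omega

-- ===== VERDICT (by name: the statement is the Claim_ definition above) =====
theorem process_spec : Claim_equal_process := by
  intro n _
  unfold Spec_process process process_alt
  rw [PySem.Int.band_one]
  have hm2 : PySem.Int.mod n 2 = n % 2 := PySem.Int.mod_eq_emod_of_pos (by norm_num)
  have hm8 : PySem.Int.mod n 8 = n % 8 := PySem.Int.mod_eq_emod_of_pos (by norm_num)
  have hd8 : PySem.Int.floordiv n 8 = n / 8 := PySem.Int.floordiv_eq_ediv_of_pos (by norm_num)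
  by_cases h2 : n % 2 = 0
  · simp only [hm2, hm8, hd8, h2]
    by_cases h8 : n % 8 = 0
    · simp [h8]
    · have hr : n % 8 = 2 ∨ n % 8 = 4 ∨ n % 8 = 6 := by omega
      have hdm := Int.mul_ediv_add_emod n 8
      have hceil : PySem.Int.floordiv (-n) 8 = (-n) / 8 :=
        PySem.Int.floordiv_eq_ediv_of_pos (by norm_num)
      have hcd := Int.mul_ediv_add_emod (-n) 8
      have hcm : (-n) % 8 = 8 - n % 8 := by omega
      simp only [ne_eq, not_true_eq_false, if_false, h8, hceil]
      rcases hr with hr | hr | hr <;>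
        simp only [hr] <;>
        [rw [processLoop_two]; rw [processLoop_four]; rw [processLoop_six]] <;>
        split_ifs <;> omega
  · simp [h2]
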